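-- pv_equiv track=rewrite | github.com/StefanoGenettiUniTN/appa-chinquinaria | scripts/create_curated_appa_pm10_dataset.py | find_contiguous_missing_periods
-- ===== SOURCE A (Python) =====
-- def find_contiguous_missing_periods(actual_times_set, expected_times):
--     """Find all contiguous missing periods and return their start/end indices."""
--     missing_periods = []
--     if len(expected_times) == 0:
--         return missing_periods
--
--     missing_indices = []
--     for i, t in enumerate(expected_times):
--         if t not in actual_times_set:
--             missing_indices.append(i)
--
--     if not missing_indices:
--         return missing_periods
--
--     # Group consecutive indices
--     start_idx = missing_indices[0]
--     end_idx = missing_indices[0]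
--
--     for i in range(1, len(missing_indices)):
--         if missing_indices[i] == missing_indices[i-1] + 1:
--             end_idx = missing_indices[i]
--         else:
--             length = end_idx - start_idx + 1
--             missing_periods.append((start_idx, end_idx, length))
--             start_idx = missing_indices[i]
--             end_idx = missing_indices[i]
--
--     # Add the last period
--     length = end_idx - start_idx + 1
--     missing_periods.append((start_idx, end_idx, length))
--
--     return missing_periods
-- ===== SOURCE B (Python) =====
-- def find_contiguous_missing_periods(actual_times_set, expected_times):
--     """Single pass over enumerate(expected_times) carrying open-run state;
--     no intermediate list of missing indices is built."""
--     periods = []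
--     start = None
--     end = None
--     for i, t in enumerate(expected_times):
--         if t not in actual_times_set:
--             if start is None:
--                 start = i
--             end = i
--         else:
--             if start is not None:
--                 periods.append((start, end, end - start + 1))
--                 start = None
--     if start is not None:
--         periods.append((start, end, end - start + 1))
--     return periods
-- ===== Notes on version B (the rewrite author's own statement) =====
-- stated objective: simpler
-- what changed: B fuses A's two passes (build the full list of missing indices, then group consecutive ones with a second indexed loop) into one pass over enumerate(expected_times) carrying open-run state (start,end), building no intermediate index list.
import Mathlib
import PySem

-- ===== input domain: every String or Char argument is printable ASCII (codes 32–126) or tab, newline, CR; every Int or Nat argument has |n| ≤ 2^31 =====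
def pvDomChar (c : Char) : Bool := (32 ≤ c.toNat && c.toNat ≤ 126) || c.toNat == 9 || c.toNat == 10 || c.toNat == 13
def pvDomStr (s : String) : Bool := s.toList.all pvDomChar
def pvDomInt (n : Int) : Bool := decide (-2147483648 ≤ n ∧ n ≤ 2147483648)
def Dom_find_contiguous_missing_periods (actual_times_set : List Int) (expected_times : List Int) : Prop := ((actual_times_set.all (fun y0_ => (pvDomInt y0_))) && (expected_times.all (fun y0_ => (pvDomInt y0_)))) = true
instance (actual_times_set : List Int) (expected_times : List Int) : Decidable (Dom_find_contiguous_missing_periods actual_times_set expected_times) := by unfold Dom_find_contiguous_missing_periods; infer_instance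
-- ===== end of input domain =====

-- B replaces A's two passes (collect all missing indices, then group consecutive ones)
-- by one pass over enumerate(expected_times) carrying open-run state; objective: simpler.

-- ===== PORT A =====
-- Step of A's grouping loop (body of `for i in range(1, len(missing_indices))`).
-- missing_indices[i] / missing_indices[i-1] are always in range there, so pyGetD with
-- default 0 is exact.
def pvStepA (L : List Int) (st : List (Int × Int × Int) × Int × Int) (i : Int) :
    List (Int × Int × Int) × Int × Int :=
  if PySem.List.pyGetD L i 0 = PySem.List.pyGetD L (i - 1) 0 + 1 then
    (st.1, st.2.1, PySem.List.pyGetD L i 0)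
  else
    let length := st.2.2 - st.2.1 + 1
    (st.1 ++ [(st.2.1, st.2.2, length)], PySem.List.pyGetD L i 0, PySem.List.pyGetD L i 0)

def find_contiguous_missing_periods (actual_times_set : List Int) (expected_times : List Int) : List (Int × Int × Int) :=
  if expected_times.length = 0 then []
  else
    let missing_indices : List Int :=
      (PySem.List.enumerate expected_times 0).foldl
        (fun acc p => if actual_times_set.contains p.2 then acc else acc ++ [p.1]) []
    if missing_indices = [] then []
    else
      let start_idx := PySem.List.pyGetD missing_indices 0 0
      let end_idx := PySem.List.pyGetD missing_indices 0 0
      let st := (PySem.List.pyRange 1 missing_indices.length 1).foldl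
        (pvStepA missing_indices) ([], start_idx, end_idx)
      st.1 ++ [(st.2.1, st.2.2, st.2.2 - st.2.1 + 1)]

-- ===== PORT B =====
-- run state: none = no open run, some (start, end) = open run (Python's start/end vars;
-- end is only read while a run is open, so the pair is the faithful state).
def pvStepB (actual_times_set : List Int)
    (st : List (Int × Int × Int) × Option (Int × Int)) (p : Int × Int) :
    List (Int × Int × Int) × Option (Int × Int) :=
  if actual_times_set.contains p.2 then
    match st.2 with
    | some (s, e) => (st.1 ++ [(s, e, e - s + 1)], none)
    | none => st
  else
    match st.2 with
    | some (s, _) => (st.1, some (s, p.1))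
    | none => (st.1, some (p.1, p.1))

def find_contiguous_missing_periods_alt (actual_times_set : List Int) (expected_times : List Int) : List (Int × Int × Int) :=
  let st := (PySem.List.enumerate expected_times 0).foldl (pvStepB actual_times_set) ([], none)
  match st.2 with
  | some (s, e) => st.1 ++ [(s, e, e - s + 1)]
  | none => st.1

-- ===== PRECONDITION & SPEC =====
def Spec_find_contiguous_missing_periods (actual_times_set : List Int) (expected_times : List Int) (out : List (Int × Int × Int)) : Prop := out = find_contiguous_missing_periods_alt actual_times_set expected_times
instance (actual_times_set : List Int) (expected_times : List Int) (out : List (Int × Int × Int)) : Decidable (Spec_find_contiguous_missing_periods actual_times_set expected_times out) := by unfold Spec_find_contiguous_missing_periods; infer_instance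

-- ===== CLAIM (what is proved, stated in full; the proofs are below) =====
def Claim_equal_find_contiguous_missing_periods : Prop := ∀ (actual_times_set : List Int) (expected_times : List Int), Dom_find_contiguous_missing_periods actual_times_set expected_times → Spec_find_contiguous_missing_periods actual_times_set expected_times (find_contiguous_missing_periods actual_times_set expected_times)

-- ===== LEMMAS AND PROOFS =====

-- indices (as Ints, counted from i) of the elements of ts not in a
def pvMiss (a : List Int) : List Int → Int → List Int
  | [], _ => []
  | t :: ts, i => if a.contains t then pvMiss a ts (i + 1) else i :: pvMiss a ts (i + 1)

-- group a list of indices into maximal runs of consecutive values, open run (s, e)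
def pvGo (s e : Int) : List Int → List (Int × Int × Int)
  | [] => [(s, e, e - s + 1)]
  | y :: ys => if y = e + 1 then pvGo s y ys else (s, e, e - s + 1) :: pvGo y y ys

def pvRuns : List Int → List (Int × Int × Int)
  | [] => []
  | x :: xs => pvGo x x xs

-- A's trailing "append the last period" applied to the loop state
def pvFlush (st : List (Int × Int × Int) × Int × Int) : List (Int × Int × Int) :=
  st.1 ++ [(st.2.1, st.2.2, st.2.2 - st.2.1 + 1)]

-- B's trailing "flush any still-open run" applied to the loop state
def pvFinish (st : List (Int × Int × Int) × Option (Int × Int)) : List (Int × Int × Int) :=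
  match st.2 with
  | some (s, e) => st.1 ++ [(s, e, e - s + 1)]
  | none => st.1

theorem pvMiss_ge (a : List Int) : ∀ (ts : List Int) (i m : Int), m ∈ pvMiss a ts i → i ≤ m := by
  intro ts
  induction ts with
  | nil => intro i m h; simp [pvMiss] at h
  | cons t ts ih =>
    intro i m h
    simp only [pvMiss] at h
    split at h
    · have := ih (i + 1) m h; omega
    · rcases List.mem_cons.mp h with rfl | h
      · omega
      · have := ih (i + 1) m h; omega

theorem pvGo_not_succ (s e : Int) (M : List Int) (h : ∀ m ∈ M, m ≠ e + 1) :
    pvGo s e M = (s, e, e - s + 1) :: pvRuns M := by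
  cases M with
  | nil => simp [pvGo, pvRuns]
  | cons y ys =>
    have hy : y ≠ e + 1 := h y (List.mem_cons_self)
    simp [pvGo, pvRuns, hy]

-- Phase 1 of A: the foldl over enumerate building missing_indices is pvMiss.
theorem pvFoldA (a : List Int) : ∀ (ts : List Int) (i : Int) (acc : List Int),
    (PySem.List.enumerate ts i).foldl
      (fun acc p => if a.contains p.2 then acc else acc ++ [p.1]) acc
      = acc ++ pvMiss a ts i := by
  intro ts
  induction ts with
  | nil => intro i acc; simp [PySem.List.enumerate_nil, pvMiss]
  | cons t ts ih =>
    intro i acc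
    rw [PySem.List.enumerate_cons, List.foldl_cons]
    by_cases h : a.contains t
    · simp only [pvMiss]
      rw [if_pos h, if_pos h, ih]
    · simp only [pvMiss]
      rw [if_neg h, if_neg h, ih]
      simp

-- Phase 2 of A: the index loop plus the final append computes pvGo on the tail.
theorem pvFoldRange (L : List Int) :
    ∀ (n : Nat) (k : Nat) (acc : List (Int × Int × Int)) (s e : Int),
    n = L.length - k → 1 ≤ k → k ≤ L.length → L[k - 1]? = some e →
    pvFlush ((PySem.List.pyRange (k : Int) L.length 1).foldl (pvStepA L) (acc, s, e))
      = acc ++ pvGo s e (L.drop k) := by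
  intro n
  induction n with
  | zero =>
    intro k acc s e hn hk1 hkl he
    have hkl' : k = L.length := by omega
    subst hkl'
    rw [PySem.List.pyRange_one_eq_nil (by simp)]
    simp [pvFlush, pvGo, List.drop_of_length_le (le_refl _)]
  | succ n ih =>
    intro k acc s e hn hk1 hkl he
    have hlt : k < L.length := by omega
    have hcons : PySem.List.pyRange (k : Int) L.length 1 = (k : Int) :: PySem.List.pyRange ((k : Int) + 1) L.length 1 :=
      PySem.List.pyRange_one_cons (by exact_mod_cast hlt)
    have hgetk : PySem.List.pyGetD L (k : Int) 0 = L[k] := by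
      rw [PySem.List.pyGetD_natCast]
      simp [List.getD_eq_getElem?_getD, hlt]
    have hgetk1 : PySem.List.pyGetD L ((k : Int) - 1) 0 = e := by
      have hcast : (k : Int) - 1 = ((k - 1 : Nat) : Int) := by omega
      rw [hcast, PySem.List.pyGetD_natCast]
      simp [List.getD_eq_getElem?_getD, he]
    have hdrop : L.drop k = L[k] :: L.drop (k + 1) := List.drop_eq_getElem_cons hlt
    have hk1cast : (k : Int) + 1 = ((k + 1 : Nat) : Int) := by push_cast; ring
    have he' : L[(k + 1) - 1]? = some L[k] := by simp [hlt]
    rw [hcons, List.foldl_cons]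
    by_cases hc : L[k] = e + 1
    · have hstep : pvStepA L (acc, s, e) (k : Int) = (acc, s, L[k]) := by
        simp [pvStepA, hgetk, hgetk1, hc]
      rw [hstep, hk1cast, ih (k + 1) acc s L[k] (by omega) (by omega) (by omega) he']
      rw [hdrop]
      simp only [pvGo]
      rw [if_pos hc]
    · have hstep : pvStepA L (acc, s, e) (k : Int)
          = (acc ++ [(s, e, e - s + 1)], L[k], L[k]) := by
        simp [pvStepA, hgetk, hgetk1, hc]
      rw [hstep, hk1cast, ih (k + 1) (acc ++ [(s, e, e - s + 1)]) L[k] L[k] (by omega) (by omega) (by omega) he']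
      rw [hdrop]
      simp only [pvGo]
      rw [if_neg hc]
      simp

-- A computes pvRuns of the missing-index list.
theorem pvA_eq_runs (a e : List Int) :
    find_contiguous_missing_periods a e = pvRuns (pvMiss a e 0) := by
  unfold find_contiguous_missing_periods
  by_cases h0 : e.length = 0
  · have he : e = [] := List.length_eq_zero_iff.mp h0
    subst he; simp [pvMiss, pvRuns]
  · simp only [if_neg h0]
    rw [pvFoldA]
    simp only [List.nil_append]
    generalize pvMiss a e 0 = L
    by_cases hnil : L = []
    · simp [hnil, pvRuns]
    · simp only [if_neg hnil]
      obtain ⟨x, xs, rfl⟩ := List.exists_cons_of_ne_nil hnil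
      have hget0 : PySem.List.pyGetD (x :: xs) (0 : Int) 0 = x := by
        have h00 : ((0 : Nat) : Int) = (0 : Int) := by norm_num
        rw [← h00, PySem.List.pyGetD_natCast]; rfl
      rw [hget0]
      have h1 : ((1 : Nat) : Int) = (1 : Int) := by norm_num
      have hmain := pvFoldRange (x :: xs) ((x :: xs).length - 1) 1 [] x x rfl (by omega)
        (by simp) (by simp)
      rw [h1] at hmain
      show pvFlush _ = _
      rw [hmain]
      simp [pvRuns]

-- B's fold with no open run computes pvRuns; with an open run (s, i-1) it computes pvGo.
theorem pvFoldB (a : List Int) : ∀ (ts : List Int) (i : Int) (acc : List (Int × Int × Int)),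
    (pvFinish ((PySem.List.enumerate ts i).foldl (pvStepB a) (acc, none)) = acc ++ pvRuns (pvMiss a ts i))
    ∧ (∀ s : Int,
      pvFinish ((PySem.List.enumerate ts i).foldl (pvStepB a) (acc, some (s, i - 1)))
        = acc ++ pvGo s (i - 1) (pvMiss a ts i)) := by
  intro ts
  induction ts with
  | nil =>
    intro i acc
    constructor
    · simp [PySem.List.enumerate_nil, pvFinish, pvMiss, pvRuns]
    · intro s; simp [PySem.List.enumerate_nil, pvFinish, pvMiss, pvGo]
  | cons t ts ih =>
    intro i acc
    constructor
    · rw [PySem.List.enumerate_cons, List.foldl_cons]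
      simp only [pvMiss]
      by_cases h : a.contains t
      · have hstep : pvStepB a (acc, none) (i, t) = (acc, none) := by
          unfold pvStepB; rw [if_pos h]
        rw [hstep, if_pos h]
        exact (ih (i + 1) acc).1
      · have hstep : pvStepB a (acc, none) (i, t) = (acc, some (i, i)) := by
          unfold pvStepB; rw [if_neg h]
        have hsi : (some ((i : Int), i) : Option (Int × Int)) = some (i, (i + 1) - 1) := by norm_num
        rw [hstep, if_neg h, hsi, ((ih (i + 1) acc).2) i]
        have hgo : pvGo i ((i + 1) - 1) (pvMiss a ts (i + 1)) = pvRuns (i :: pvMiss a ts (i + 1)) := by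
          simp only [pvRuns]
          norm_num
        rw [hgo]
    · intro s
      rw [PySem.List.enumerate_cons, List.foldl_cons]
      simp only [pvMiss]
      by_cases h : a.contains t
      · have hstep : pvStepB a (acc, some (s, i - 1)) (i, t)
            = (acc ++ [(s, i - 1, i - 1 - s + 1)], none) := by
          unfold pvStepB; rw [if_pos h]
        rw [hstep, if_pos h, (ih (i + 1) (acc ++ [(s, i - 1, i - 1 - s + 1)])).1]
        rw [pvGo_not_succ s (i - 1) (pvMiss a ts (i + 1))
          (by intro m hm; have := pvMiss_ge a ts (i + 1) m hm; omega)]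
        simp
      · have hstep : pvStepB a (acc, some (s, i - 1)) (i, t) = (acc, some (s, i)) := by
          unfold pvStepB; rw [if_neg h]
        have hsi : (some (s, i) : Option (Int × Int)) = some (s, (i + 1) - 1) := by norm_num
        rw [hstep, if_neg h, hsi, ((ih (i + 1) acc).2) s]
        have hgo : pvGo s (i - 1) (i :: pvMiss a ts (i + 1)) = pvGo s ((i + 1) - 1) (pvMiss a ts (i + 1)) := by
          simp only [pvGo]
          rw [if_pos (by ring)]
          norm_num
        rw [hgo]

theorem pvB_eq_runs (a e : List Int) :
    find_contiguous_missing_periods_alt a e = pvRuns (pvMiss a e 0) := by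
  show pvFinish _ = _
  simpa using (pvFoldB a e 0 []).1

-- ===== VERDICT (by name: the statement is the Claim_ definition above) =====
theorem find_contiguous_missing_periods_spec : Claim_equal_find_contiguous_missing_periods := by
  intro a e _
  unfold Spec_find_contiguous_missing_periods
  rw [pvA_eq_runs, pvB_eq_runs]
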